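-- pv_equiv track=rewrite | github.com/bhj8286/algo | programmers/피자나눠먹기2/sol.py | solution
-- ===== SOURCE A (Python) =====
-- def solution(n):
--     answer = 0
--     a, b = divmod(n, 6)
--     if b == 0:
--         answer = a
--     elif b != 0:
--         for i in range(max(n, 6),(n*6)+1):
--             if i % n == 0 and i % 6 == 0:
--                 answer = i // 6
--                 break
--     return answer
-- ===== SOURCE B (Python) =====
-- def solution(n):
--     # Number of pizzas so that n people each get whole pieces of 6-slice
--     # pizzas with none left over: n // gcd(n, 6), gcd by Euclid's algorithm.
--     a, b = n, 6
--     while b: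
--         a, b = b, a % b
--     return n // a
-- ===== Notes on version B (the rewrite author's own statement) =====
-- stated objective: faster
-- what changed: Replaces A's linear scan from max(n,6) to 6n looking for the first common multiple by Euclid's gcd algorithm, returning n // gcd(n, 6) directly.
-- outside the precondition, e.g. on solution(-5): A returns 0, B returns -5
import Mathlib
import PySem

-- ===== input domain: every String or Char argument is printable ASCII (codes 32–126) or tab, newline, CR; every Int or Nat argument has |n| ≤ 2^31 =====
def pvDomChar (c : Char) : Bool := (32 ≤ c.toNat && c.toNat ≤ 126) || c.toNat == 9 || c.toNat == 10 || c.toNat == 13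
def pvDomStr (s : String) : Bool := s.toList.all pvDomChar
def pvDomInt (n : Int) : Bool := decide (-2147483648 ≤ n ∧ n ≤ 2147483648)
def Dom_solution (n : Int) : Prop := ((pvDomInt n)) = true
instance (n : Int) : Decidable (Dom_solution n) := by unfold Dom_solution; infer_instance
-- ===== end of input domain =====

-- B replaces A's linear scan for the first common multiple of n and 6 by Euclid's
-- gcd algorithm (n // gcd(n,6)); objective: faster (asymptotic, O(log n) vs O(n)).


-- ===== PORT A =====
-- the 'for i in range(...): if ...: answer = i // 6; break' loop of A
def solutionLoop (n : Int) : List Int → Int → Int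
  | [], answer => answer
  | i :: rest, answer =>
    if PySem.Int.mod i n = 0 ∧ PySem.Int.mod i 6 = 0 then PySem.Int.floordiv i 6
    else solutionLoop n rest answer

def solution (n : Int) : Int :=
  let a := PySem.Int.floordiv n 6
  let b := PySem.Int.mod n 6
  if b = 0 then a
  else solutionLoop n (PySem.List.pyRange (max n 6) (n * 6 + 1) 1) 0

-- ===== PORT B =====
-- termination fact for the Euclid loop (cited by decreasing_by)
theorem pyMod_natAbs_lt (a b : Int) (h : b ≠ 0) : (PySem.Int.mod a b).natAbs < b.natAbs := by
  rcases lt_trichotomy b 0 with hb | hb | hb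
  · have h2 : (0:Int) < -b := by omega
    have hm : PySem.Int.mod (-(-a)) (-(-b)) = -PySem.Int.mod (-a) (-b) :=
      PySem.Int.mod_neg_neg (-a) (-b)
    simp only [neg_neg] at hm
    rw [hm, PySem.Int.mod_eq_emod_of_pos h2]
    have h3 := Int.emod_nonneg (-a) (by omega : (-b) ≠ 0)
    have h4 := Int.emod_lt_of_pos (-a) h2
    omega
  · omega
  · rw [PySem.Int.mod_eq_emod_of_pos hb]
    have h3 := Int.emod_nonneg a h
    have h4 := Int.emod_lt_of_pos a hb
    omega

-- the 'while b: a, b = b, a % b' loop of B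
def euclid (a b : Int) : Int :=
  if _h : b = 0 then a else euclid b (PySem.Int.mod a b)
termination_by b.natAbs
decreasing_by exact pyMod_natAbs_lt a b _h

def solution_alt (n : Int) : Int := PySem.Int.floordiv n (euclid n 6)

-- ===== PRECONDITION & SPEC =====
-- Pre_ restricts to the task's natural domain, non-negative people counts: A accepts
-- negative n too, but there its answer (0 unless 6 divides n) is an artefact of its
-- empty search range, outside the function's purpose.
def Pre_solution (n : Int) : Prop := 0 ≤ n
instance (n : Int) : Decidable (Pre_solution n) := by unfold Pre_solution; infer_instance
def pvWitness_solution : Int := (7)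
def Spec_solution (n : Int) (out : Int) : Prop := out = solution_alt n
instance (n : Int) (out : Int) : Decidable (Spec_solution n out) := by unfold Spec_solution; infer_instance

-- ===== CLAIM (what is proved, stated in full; the proofs are below) =====
def Claim_equal_solution : Prop := ∀ (n : Int), Dom_solution n → Pre_solution n → Spec_solution n (solution n)

-- ===== LEMMAS AND PROOFS =====

theorem gcd_step (a b : Int) (ha : 0 ≤ a) (hb : 0 < b) :
    Int.gcd a b = Int.gcd b (a % b) := by
  have h1 : (a % b).natAbs = a.natAbs % b.natAbs := by
    have : ((a.natAbs % b.natAbs : Nat) : Int) = a % b := by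
      push_cast [Int.natAbs_of_nonneg ha, Int.natAbs_of_nonneg hb.le]
      rfl
    omega
  unfold Int.gcd
  rw [h1, Nat.gcd_comm a.natAbs b.natAbs, Nat.gcd_rec b.natAbs a.natAbs, Nat.gcd_comm]

-- the Euclid loop computes gcd on non-negative inputs
theorem euclid_eq_gcd (a b : Int) (ha : 0 ≤ a) (hb : 0 ≤ b) :
    euclid a b = (Int.gcd a b : Int) := by
  by_cases h : b = 0
  · subst h
    rw [euclid]
    simp [Int.natAbs_of_nonneg ha]
  · have hb' : 0 < b := lt_of_le_of_ne hb (Ne.symm h)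
    rw [euclid, dif_neg h, PySem.Int.mod_eq_emod_of_pos hb']
    have h3 := Int.emod_nonneg a h
    have h4 := Int.emod_lt_of_pos a hb'
    rw [euclid_eq_gcd b (a % b) hb h3, gcd_step a b ha hb']
termination_by b.natAbs
decreasing_by
  have := pyMod_natAbs_lt a b h
  rw [PySem.Int.mod_eq_emod_of_pos hb'] at this
  exact this

-- the search loop skips a prefix containing no common multiple
theorem solutionLoop_append (n : Int) (l1 l2 : List Int) (acc : Int)
    (h : ∀ i ∈ l1, ¬(PySem.Int.mod i n = 0 ∧ PySem.Int.mod i 6 = 0)) :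
    solutionLoop n (l1 ++ l2) acc = solutionLoop n l2 acc := by
  induction l1 with
  | nil => rfl
  | cons x xs ih =>
    rw [List.cons_append, solutionLoop, if_neg (h x (List.mem_cons_self))]
    exact ih (fun i hi => h i (List.mem_cons_of_mem x hi))

-- on positive n not divisible by 6, A's loop returns lcm(n,6)/6
theorem solutionLoop_finds_lcm (n : Int) (hn : 0 < n) :
    solutionLoop n (PySem.List.pyRange (max n 6) (n * 6 + 1) 1) 0
      = PySem.Int.floordiv (Int.lcm n 6 : Int) 6 := by
  set L : Int := (Int.lcm n 6 : Int) with hL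
  have hdn : n ∣ L := Int.dvd_lcm_left n 6
  have hd6 : (6:Int) ∣ L := Int.dvd_lcm_right n 6
  have hLpos : 0 < L := by
    have hne : Int.lcm n 6 ≠ 0 := by
      intro h0
      rcases Int.lcm_eq_zero_iff.mp h0 with h | h <;> omega
    rw [hL]
    exact_mod_cast Nat.pos_of_ne_zero hne
  have hLle : L ≤ n * 6 := by
    have hcm : L ∣ n * 6 := by
      rw [hL, Int.coe_lcm]
      exact lcm_dvd (dvd_mul_right n 6) (dvd_mul_left 6 n)
    exact Int.le_of_dvd (by positivity) hcm
  have hLge : max n 6 ≤ L := by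
    have h1 : n ≤ L := Int.le_of_dvd hLpos hdn
    have h2 : (6:Int) ≤ L := Int.le_of_dvd hLpos hd6
    omega
  rw [PySem.List.pyRange_one_append (max n 6) L (n * 6 + 1) hLge (by omega)]
  rw [solutionLoop_append]
  · rw [PySem.List.pyRange_one_cons (by omega : L < n * 6 + 1), solutionLoop,
      if_pos ⟨(PySem.Int.mod_eq_zero_iff_dvd L n).2 hdn,
              (PySem.Int.mod_eq_zero_iff_dvd L 6).2 hd6⟩]
  · intro i hi hcond
    rw [PySem.List.mem_pyRange_one] at hi
    have hdvd : L ∣ i := by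
      rw [hL, Int.coe_lcm]
      exact lcm_dvd ((PySem.Int.mod_eq_zero_iff_dvd i n).1 hcond.1)
                    ((PySem.Int.mod_eq_zero_iff_dvd i 6).1 hcond.2)
    have : L ≤ i := Int.le_of_dvd (by omega) hdvd
    omega

-- lcm(n,6)/6 = n/gcd(n,6) for 0 < n
theorem lcm_div_six (n : Int) (hn : 0 < n) :
    PySem.Int.floordiv (Int.lcm n 6 : Int) 6 = PySem.Int.floordiv n (Int.gcd n 6 : Int) := by
  set g : Int := (Int.gcd n 6 : Int) with hgdef
  have hgpos : 0 < g := by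
    have hne : Int.gcd n 6 ≠ 0 := by
      intro h0
      rcases Int.gcd_eq_zero_iff.mp h0 with ⟨h, _⟩
      omega
    rw [hgdef]
    exact_mod_cast Nat.pos_of_ne_zero hne
  have hmul : g * (Int.lcm n 6 : Int) = n * 6 := by
    have hg := Int.gcd_mul_lcm n 6
    have h2 : ((Int.gcd n 6 : Nat) : Int) * ((Int.lcm n 6 : Nat) : Int)
        = ((n.natAbs : Nat) : Int) * (((6:Int).natAbs : Nat) : Int) := by exact_mod_cast hg
    rw [Int.natAbs_of_nonneg hn.le] at h2
    norm_num at h2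
    rw [hgdef]
    exact_mod_cast h2
  obtain ⟨q, hq⟩ : g ∣ n := Int.gcd_dvd_left n 6
  have hLeq : (Int.lcm n 6 : Int) = 6 * q := by
    apply mul_left_cancel₀ (by omega : g ≠ 0)
    rw [hmul, hq]; ring
  have e1 : PySem.Int.floordiv (Int.lcm n 6 : Int) 6 = q := by
    rw [hLeq, PySem.Int.floordiv_eq_ediv_of_pos (by norm_num : (0:Int) < 6),
      Int.mul_ediv_cancel_left q (by norm_num : (6:Int) ≠ 0)]
  have e2 : PySem.Int.floordiv n g = q := by
    rw [hq, PySem.Int.floordiv_eq_ediv_of_pos hgpos,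
      Int.mul_ediv_cancel_left q (by omega : g ≠ 0)]
  rw [e1, e2]

-- ===== VERDICT (by name: the statement is the Claim_ definition above) =====
theorem solution_spec : Claim_equal_solution := by
  intro n _ hpre
  unfold Spec_solution solution solution_alt
  rw [euclid_eq_gcd n 6 hpre (by norm_num)]
  show (if PySem.Int.mod n 6 = 0 then PySem.Int.floordiv n 6
      else solutionLoop n (PySem.List.pyRange (max n 6) (n * 6 + 1) 1) 0)
    = PySem.Int.floordiv n (Int.gcd n 6 : Int)
  split_ifs with hb
  · have hdvd : (6:Int) ∣ n := (PySem.Int.mod_eq_zero_iff_dvd n 6).1 hb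
    have hgcd : Int.gcd n 6 = 6 := by
      have := Int.gcd_eq_natAbs_right (a := n) (b := 6) hdvd
      simpa using this
    rw [hgcd]
    norm_num
  · have hn : 0 < n := by
      rcases lt_or_eq_of_le hpre with h | h
      · exact h
      · exfalso; apply hb; rw [← h]; decide
    rw [solutionLoop_finds_lcm n hn, lcm_div_six n hn]
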